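-- pv_equiv track=rewrite | github.com/MrBrantCode/unitest_baseline | mut_generate/mist_train_taco/taco_6338/solution.py | count_subsequence_pairs
-- ===== SOURCE A (Python) =====
-- def count_subsequence_pairs(m, r, s, arr):
--     mod = 10 ** 9 + 7
--
--     if m == 0 or r <= s:
--         return 0
--
--     if (r - s) % 2 != 0:
--         return 0
--
--     sumb = (r - s) // 2
--     suma = r - sumb
--
--     def get_ways(num):
--         dp = [[0] * (num + 1) for _ in range(m + 1)]
--         dp[0][0] = 1
--         for c in arr:
--             for i in range(len(dp[0]) - 1, c - 1, -1):
--                 for j in range(len(dp) - 2, -1, -1):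
--                     if dp[j][i - c] > 0:
--                         dp[j + 1][i] += dp[j][i - c]
--         for j in range(len(dp)):
--             if dp[j][num] > 0:
--                 yield (j, dp[j][num])
--
--     a = list(get_ways(suma))
--     b = list(get_ways(sumb))
--
--     res = 0
--     for i in a:
--         for j in b:
--             if i[0] == j[0]:
--                 res += i[1] * j[1]
--
--     return res % mod
-- ===== SOURCE B (Python) =====
-- def count_subsequence_pairs(m, r, s, arr):
--     mod = 10 ** 9 + 7
--
--     if m == 0 or r <= s or (r - s) % 2 != 0:
--         return 0
--
--     sumb = (r - s) // 2
--     suma = r - sumb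
--
--     n = len(arr)
--     memo = {}
--
--     def f(index, count, target):
--         # number of ways to pick `count` elements from arr[index:] summing to `target`
--         if index == n:
--             return 1 if count == 0 and target == 0 else 0
--         key = (index, count, target)
--         if key not in memo:
--             res = f(index + 1, count, target)
--             c = arr[index]
--             if count >= 1 and target >= c:
--                 res += f(index + 1, count - 1, target - c)
--             memo[key] = res
--         return memo[key]
--
--     res = 0
--     for j in range(min(m, n) + 1):
--         res += f(0, j, suma) * f(0, j, sumb)
--     return res % mod
-- ===== Notes on version B (the rewrite author's own statement) =====
-- stated objective: alternative
-- what changed: Replaces the bottom-up in-place (count x sum) knapsack table and the two yielded pair-lists with a top-down memoized recursion f(index,count,target) over the array, summing f(0,j,suma)*f(0,j,sumb) directly over j capped at min(m, len(arr)) (larger j give empty counts) instead of building and matching pair lists.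
-- crash fix: When the main DP is reached (m != 0, r > s, r-s even) with m < 0, r+s < 0, or a negative array element, A raises IndexError (empty table rows or an out-of-range index i-c); B's recursion simply finds no valid selection and returns 0. — e.g. on count_subsequence_pairs(2, 6, 2, [1, -1]): A raises IndexError, B returns 0
import Mathlib
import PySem

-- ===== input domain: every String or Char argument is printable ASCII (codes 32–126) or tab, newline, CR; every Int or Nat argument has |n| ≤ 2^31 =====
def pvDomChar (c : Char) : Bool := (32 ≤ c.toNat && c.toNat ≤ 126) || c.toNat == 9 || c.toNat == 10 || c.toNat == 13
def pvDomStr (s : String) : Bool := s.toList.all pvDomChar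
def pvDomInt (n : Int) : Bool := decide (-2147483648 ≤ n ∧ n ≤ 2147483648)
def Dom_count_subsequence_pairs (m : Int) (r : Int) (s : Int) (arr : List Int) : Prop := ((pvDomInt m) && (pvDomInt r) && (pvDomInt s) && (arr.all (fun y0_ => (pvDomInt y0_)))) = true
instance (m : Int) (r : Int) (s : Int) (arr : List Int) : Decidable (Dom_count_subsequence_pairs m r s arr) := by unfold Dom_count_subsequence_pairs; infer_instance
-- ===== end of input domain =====

-- B replaces the bottom-up in-place knapsack table and the yielded pair lists by a
-- top-down recursion over the array, summing matching products directly (alternative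
-- decomposition, same asymptotic cost).


-- ===== PORT A =====
-- dp reads/writes use the total pyGetD/pySetD forms; they are exact wherever the
-- Python indexing is in range, which Pre_ below guarantees.
-- innermost 'for j' body: if dp[j][i-c] > 0: dp[j+1][i] += dp[j][i-c]
def pvInnerBody (c i : Int) (dp : List (List Int)) (j : Int) : List (List Int) :=
  let v := PySem.List.pyGetD (PySem.List.pyGetD dp j []) (i - c) 0
  if v > 0 then
    PySem.List.pySetD dp (j + 1)
      (PySem.List.pySetD (PySem.List.pyGetD dp (j + 1) []) i
        (PySem.List.pyGetD (PySem.List.pyGetD dp (j + 1) []) i 0 + v))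
  else dp

-- 'for j in range(len(dp) - 2, -1, -1)' at a fixed column i
def pvColBody (c : Int) (dp : List (List Int)) (i : Int) : List (List Int) :=
  (PySem.List.pyRange (PySem.List.len dp - 2) (-1) (-1)).foldl (pvInnerBody c i) dp

-- 'for i in range(len(dp[0]) - 1, c - 1, -1)' for one array element c
def pvPassBody (dp : List (List Int)) (c : Int) : List (List Int) :=
  (PySem.List.pyRange (PySem.List.len (PySem.List.pyGetD dp 0 []) - 1) (c - 1) (-1)).foldl
    (pvColBody c) dp

-- the generator get_ways, returned as the list of yielded pairs
def pvGetWays (m : Int) (arr : List Int) (num : Int) : List (Int × Int) :=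
  let dp0 : List (List Int) :=
    (PySem.List.pyRange 0 (m + 1) 1).map (fun _ => List.replicate (num + 1).toNat 0)
  let dp1 := PySem.List.pySetD dp0 0 (PySem.List.pySetD (PySem.List.pyGetD dp0 0 []) 0 1)
  let dp2 := arr.foldl pvPassBody dp1
  (PySem.List.pyRange 0 (PySem.List.len dp2) 1).foldl (fun acc j =>
    let v := PySem.List.pyGetD (PySem.List.pyGetD dp2 j []) num 0
    if v > 0 then acc ++ [(j, v)] else acc) []

def count_subsequence_pairs (m : Int) (r : Int) (s : Int) (arr : List Int) : Int :=
  let md : Int := 10 ^ 9 + 7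
  if m = 0 ∨ r ≤ s then 0
  else if PySem.Int.mod (r - s) 2 ≠ 0 then 0
  else
    let sumb := PySem.Int.floordiv (r - s) 2
    let suma := r - sumb
    let a := pvGetWays m arr suma
    let b := pvGetWays m arr sumb
    let res := a.foldl (fun res i =>
      b.foldl (fun res j => if i.1 = j.1 then res + i.2 * j.2 else res) res) 0
    PySem.Int.mod res md

-- ===== PORT B =====
-- f(index, count, target) of Source B, as structural recursion on arr[index:]
-- (the memo cache of Source B only avoids recomputation; the values are identical)
def pvF (arr : List Int) (count : Int) (target : Int) : Int :=
  match arr with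
  | [] => if count = 0 ∧ target = 0 then 1 else 0
  | c :: rest =>
    pvF rest count target +
      (if 1 ≤ count ∧ c ≤ target then pvF rest (count - 1) (target - c) else 0)

def count_subsequence_pairs_alt (m : Int) (r : Int) (s : Int) (arr : List Int) : Int :=
  let md : Int := 10 ^ 9 + 7
  if m = 0 ∨ r ≤ s ∨ PySem.Int.mod (r - s) 2 ≠ 0 then 0
  else
    let sumb := PySem.Int.floordiv (r - s) 2
    let suma := r - sumb
    let res := (PySem.List.pyRange 0 (min m (PySem.List.len arr) + 1) 1).foldl
      (fun res j => res + pvF arr j suma * pvF arr j sumb) 0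
    PySem.Int.mod res md

-- ===== PRECONDITION & SPEC =====
-- Pre_ excludes exactly the inputs on which A raises IndexError: once the DP is
-- reached the table needs m ≥ 1 rows and suma = (r+s)/2 ≥ 0 columns, and a negative
-- array element makes A read dp[j][i-c] past the end of a row.
def Pre_count_subsequence_pairs (m : Int) (r : Int) (s : Int) (arr : List Int) : Prop :=
  (m = 0 ∨ r ≤ s ∨ PySem.Int.mod (r - s) 2 ≠ 0) ∨
    (1 ≤ m ∧ 0 ≤ r + s ∧ ∀ c ∈ arr, 0 ≤ c)
instance (m : Int) (r : Int) (s : Int) (arr : List Int) : Decidable (Pre_count_subsequence_pairs m r s arr) := by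
  unfold Pre_count_subsequence_pairs; infer_instance

def pvWitness_count_subsequence_pairs : Int × Int × Int × List Int := (3, 4, 0, [2, 2, 2])

-- When the main DP is reached (m ≠ 0, r > s, r-s even) with m < 0, r+s < 0 or a
-- negative array element, A raises IndexError; B's recursion finds no valid selection
-- and returns 0.
def Raises_count_subsequence_pairs (m : Int) (r : Int) (s : Int) (arr : List Int) : Prop :=
  ¬ (m = 0 ∨ r ≤ s ∨ PySem.Int.mod (r - s) 2 ≠ 0) ∧
    (m < 1 ∨ r + s < 0 ∨ ∃ c ∈ arr, c < 0)
instance (m : Int) (r : Int) (s : Int) (arr : List Int) : Decidable (Raises_count_subsequence_pairs m r s arr) := by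
  unfold Raises_count_subsequence_pairs; infer_instance

def pvRaiseWitness_count_subsequence_pairs : Int × Int × Int × List Int := (2, 6, 2, [1, -1])
def pvRaiseWitnessOut_count_subsequence_pairs : Int := 0

def Spec_count_subsequence_pairs (m : Int) (r : Int) (s : Int) (arr : List Int) (out : Int) : Prop := out = count_subsequence_pairs_alt m r s arr
instance (m : Int) (r : Int) (s : Int) (arr : List Int) (out : Int) : Decidable (Spec_count_subsequence_pairs m r s arr out) := by unfold Spec_count_subsequence_pairs; infer_instance

-- ===== CLAIM (what is proved, stated in full; the proofs are below) =====
def Claim_equal_count_subsequence_pairs : Prop := ∀ (m : Int) (r : Int) (s : Int) (arr : List Int), Dom_count_subsequence_pairs m r s arr → Pre_count_subsequence_pairs m r s arr → Spec_count_subsequence_pairs m r s arr (count_subsequence_pairs m r s arr)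

def Claim_raises_count_subsequence_pairs : Prop := (∀ (m : Int) (r : Int) (s : Int) (arr : List Int), Dom_count_subsequence_pairs m r s arr → Raises_count_subsequence_pairs m r s arr → ¬ Pre_count_subsequence_pairs m r s arr) ∧ (Dom_count_subsequence_pairs (pvRaiseWitness_count_subsequence_pairs.1) (pvRaiseWitness_count_subsequence_pairs.2.1) (pvRaiseWitness_count_subsequence_pairs.2.2.1) (pvRaiseWitness_count_subsequence_pairs.2.2.2) ∧ Raises_count_subsequence_pairs (pvRaiseWitness_count_subsequence_pairs.1) (pvRaiseWitness_count_subsequence_pairs.2.1) (pvRaiseWitness_count_subsequence_pairs.2.2.1) (pvRaiseWitness_count_subsequence_pairs.2.2.2) ∧ count_subsequence_pairs_alt (pvRaiseWitness_count_subsequence_pairs.1) (pvRaiseWitness_count_subsequence_pairs.2.1) (pvRaiseWitness_count_subsequence_pairs.2.2.1) (pvRaiseWitness_count_subsequence_pairs.2.2.2) = pvRaiseWitnessOut_count_subsequence_pairs)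

-- ===== LEMMAS AND PROOFS =====

theorem pvF_nonneg (arr : List Int) (j i : Int) : 0 ≤ pvF arr j i := by
  induction arr generalizing j i with
  | nil => simp only [pvF]; split <;> norm_num
  | cons c rest ih =>
    simp only [pvF]
    have h1 := ih j i
    have h2 := ih (j - 1) (i - c)
    split <;> omega

theorem pvF_snoc (l : List Int) (c j i : Int) (hc : 0 ≤ c) (hl : ∀ x ∈ l, 0 ≤ x) :
    pvF (l ++ [c]) j i = pvF l j i + (if 1 ≤ j ∧ c ≤ i then pvF l (j - 1) (i - c) else 0) := by
  induction l generalizing j i with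
  | nil => simp [pvF]
  | cons x rest ih =>
    have hx : 0 ≤ x := hl x (by simp)
    have hrest : ∀ y ∈ rest, 0 ≤ y := fun y hy => hl y (by simp [hy])
    rw [List.cons_append]
    simp only [pvF]
    rw [ih _ _ hrest, ih _ _ hrest]
    have e1 : i - x - c = i - c - x := by ring
    rw [e1]
    split_ifs <;> first | (exfalso; omega) | ring

def pvGet2 (dp : List (List Int)) (j i : Nat) : Int := (dp.getD j []).getD i 0

def pvRel (Mn Nn : Nat) (F : Nat → Nat → Int) (dp : List (List Int)) : Prop :=
  dp.length = Mn ∧ (∀ row ∈ dp, row.length = Nn) ∧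
    ∀ j i : Nat, j < Mn → i < Nn → pvGet2 dp j i = F j i

theorem pvRel_congr {Mn Nn : Nat} {F G : Nat → Nat → Int} {dp : List (List Int)}
    (h : pvRel Mn Nn F dp) (hFG : ∀ j i : Nat, j < Mn → i < Nn → F j i = G j i) :
    pvRel Mn Nn G dp := ⟨h.1, h.2.1, fun j i hj hi => (h.2.2 j i hj hi).trans (hFG j i hj hi)⟩

theorem pvRel_read {Mn Nn : Nat} {F : Nat → Nat → Int} {dp : List (List Int)}
    (h : pvRel Mn Nn F dp) (jn iN : Nat) (hj : jn < Mn) (hi : iN < Nn) :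
    PySem.List.pyGetD (PySem.List.pyGetD dp (jn : Int) []) (iN : Int) 0 = F jn iN := by
  rw [PySem.List.pyGetD_natCast, PySem.List.pyGetD_natCast]
  exact h.2.2 jn iN hj hi

theorem pvRel_write {Mn Nn : Nat} {F : Nat → Nat → Int} {dp : List (List Int)}
    (h : pvRel Mn Nn F dp) (jn iN : Nat) (v : Int) (hj : jn < Mn) (hi : iN < Nn) :
    pvRel Mn Nn (fun j' i' => if j' = jn ∧ i' = iN then v else F j' i')
      (PySem.List.pySetD dp (jn : Int)
        (PySem.List.pySetD (PySem.List.pyGetD dp (jn : Int) []) (iN : Int) v)) := by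
  obtain ⟨hlen, hrows, hval⟩ := h
  rw [PySem.List.pyGetD_natCast, PySem.List.pySetD_natCast, PySem.List.pySetD_natCast]
  have hjn : jn < dp.length := by omega
  have hrow : dp.getD jn [] = dp[jn] := by
    rw [List.getD_eq_getElem?_getD, List.getElem?_eq_getElem hjn]; rfl
  have hrowlen : (dp.getD jn []).length = Nn := by
    rw [hrow]; exact hrows _ (List.getElem_mem hjn)
  refine ⟨by simpa using hlen, ?_, ?_⟩
  · intro row hrowm
    rcases List.mem_or_eq_of_mem_set hrowm with h1 | h1
    · exact hrows row h1
    · subst h1; rw [List.length_set]; exact hrowlen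
  · intro j' i' hj' hi'
    show _ = if j' = jn ∧ i' = iN then v else F j' i'
    unfold pvGet2
    by_cases hjj : j' = jn
    · subst hjj
      have e1 : (dp.set j' ((dp.getD j' []).set iN v)).getD j' [] = (dp.getD j' []).set iN v := by
        rw [List.getD_eq_getElem?_getD, List.getElem?_set_self hjn]; rfl
      rw [e1]
      by_cases hii : i' = iN
      · subst hii
        rw [if_pos ⟨rfl, rfl⟩, List.getD_eq_getElem?_getD,
            List.getElem?_set_self (by omega), Option.getD_some]
      · rw [if_neg (by tauto), List.getD_eq_getElem?_getD, List.getElem?_set_ne (by omega),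
            ← List.getD_eq_getElem?_getD]
        exact hval j' i' hj' hi'
    · have e1 : (dp.set jn ((dp.getD jn []).set iN v)).getD j' [] = dp.getD j' [] := by
        rw [List.getD_eq_getElem?_getD, List.getElem?_set_ne (by omega), ← List.getD_eq_getElem?_getD]
      rw [e1, if_neg (by tauto)]
      exact hval j' i' hj' hi'

def pvFinF (l : List Int) (c iI u : Int) (j i' : Nat) : Int :=
  if iI < (i' : Int) ∨ ((i' : Int) = iI ∧ u + 2 ≤ (j : Int)) then pvF (l ++ [c]) j i'
  else pvF l j i'

theorem pvInner_step (m num c iI u : Int) (l : List Int) (dp : List (List Int))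
    (hm : 1 ≤ m) (hnum : 0 ≤ num) (hc : 0 ≤ c) (hl : ∀ x ∈ l, 0 ≤ x)
    (hci : c ≤ iI) (hin : iI ≤ num) (hu0 : 0 ≤ u) (hum : u ≤ m - 1)
    (h : pvRel (m + 1).toNat (num + 1).toNat (pvFinF l c iI u) dp) :
    pvRel (m + 1).toNat (num + 1).toNat (pvFinF l c iI (u - 1)) (pvInnerBody c iI dp u) := by
  have h1 : u = (u.toNat : Int) := (Int.toNat_of_nonneg hu0).symm
  have hic : iI - c = ((iI - c).toNat : Int) := (Int.toNat_of_nonneg (by omega)).symm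
  have hiI : iI = (iI.toNat : Int) := (Int.toNat_of_nonneg (by omega)).symm
  have hu1 : u + 1 = ((u.toNat + 1 : Nat) : Int) := by push_cast; omega
  have hv : PySem.List.pyGetD (PySem.List.pyGetD dp u []) (iI - c) 0 = pvF l u (iI - c) := by
    rw [h1, hic, pvRel_read h u.toNat (iI - c).toNat (by omega) (by omega)]
    unfold pvFinF
    rw [if_neg (by omega)]
  have hr2 : PySem.List.pyGetD (PySem.List.pyGetD dp (u + 1) []) iI 0 = pvF l (u + 1) iI := by
    rw [hu1, hiI, pvRel_read h (u.toNat + 1) iI.toNat (by omega) (by omega)]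
    unfold pvFinF
    rw [if_neg (by omega)]
  simp only [pvInnerBody]
  rw [hv, hr2]
  split_ifs with hpos
  · -- dp[u+1][iI] += v
    have hw := pvRel_write h (u.toNat + 1) iI.toNat (pvF l (u + 1) iI + pvF l u (iI - c))
      (by omega) (by omega)
    have hw2 := pvRel_congr (G := pvFinF l c iI (u - 1)) hw ?hpt
    case hpt =>
      intro j' i' hj' hi'
      show (if j' = u.toNat + 1 ∧ i' = iI.toNat then pvF l (u + 1) iI + pvF l u (iI - c)
            else pvFinF l c iI u j' i') = pvFinF l c iI (u - 1) j' i'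
      by_cases hhit : j' = u.toNat + 1 ∧ i' = iI.toNat
      · rw [if_pos hhit]
        unfold pvFinF
        rw [if_pos (by omega)]
        rw [pvF_snoc l c _ _ hc hl, if_pos (by constructor <;> omega)]
        have e1 : ((j' : Int)) = u + 1 := by omega
        have e2 : ((i' : Int)) = iI := by omega
        rw [e1, e2]
        norm_num
      · rw [if_neg hhit]
        unfold pvFinF
        by_cases hcond : iI < (i' : Int) ∨ ((i' : Int) = iI ∧ u + 2 ≤ (j' : Int))
        · rw [if_pos hcond, if_pos (by omega)]
        · rw [if_neg hcond, if_neg (by omega)]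
    rw [← hu1, ← hiI] at hw2
    exact hw2
  · -- no write: v = 0
    have hz : pvF l u (iI - c) = 0 := le_antisymm (by omega) (pvF_nonneg l u (iI - c))
    refine pvRel_congr h ?_
    intro j' i' hj' hi'
    unfold pvFinF
    by_cases hcond : iI < (i' : Int) ∨ ((i' : Int) = iI ∧ u + 2 ≤ (j' : Int))
    · rw [if_pos hcond, if_pos (by omega)]
    · rw [if_neg hcond]
      by_cases hcond' : iI < (i' : Int) ∨ ((i' : Int) = iI ∧ u - 1 + 2 ≤ (j' : Int))
      · rw [if_pos hcond']
        -- only possible at j' = u+1, i' = iI, where the increment is zero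
        rw [pvF_snoc l c _ _ hc hl, if_pos (by constructor <;> omega)]
        have e1 : ((j' : Int)) - 1 = u := by omega
        have e2 : ((i' : Int)) - c = iI - c := by omega
        rw [e1, e2, hz]
        ring
      · rw [if_neg hcond']

def pvColF (l : List Int) (c t : Int) (j i' : Nat) : Int :=
  if t ≤ (i' : Int) then pvF (l ++ [c]) j i' else pvF l j i'

theorem pvInner_loop (m num c iI : Int) (l : List Int)
    (hm : 1 ≤ m) (hnum : 0 ≤ num) (hc : 0 ≤ c) (hl : ∀ x ∈ l, 0 ≤ x)
    (hci : c ≤ iI) (hin : iI ≤ num) :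
    ∀ (k : Nat), (k : Int) ≤ m → ∀ dp,
      pvRel (m + 1).toNat (num + 1).toNat (pvFinF l c iI ((k : Int) - 1)) dp →
      pvRel (m + 1).toNat (num + 1).toNat (pvFinF l c iI (-1))
        ((PySem.List.pyRange ((k : Int) - 1) (-1) (-1)).foldl (pvInnerBody c iI) dp) := by
  intro k
  induction k with
  | zero =>
    intro _ dp h
    rw [PySem.List.pyRange_neg_one_eq_nil (by norm_num)]
    simpa using h
  | succ k ih =>
    intro hk dp h
    have e1 : ((k + 1 : Nat) : Int) - 1 = (k : Int) := by push_cast; ring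
    rw [e1] at h ⊢
    rw [PySem.List.pyRange_neg_one_cons (by omega), List.foldl_cons]
    have h' : pvRel (m + 1).toNat (num + 1).toNat (pvFinF l c iI ((k : Int) - 1))
        (pvInnerBody c iI dp (k : Int)) := by
      have := pvInner_step m num c iI (k : Int) l dp hm hnum hc hl hci hin (by omega) (by omega)
        (by
          have e2 : ((k : Int)) = (k : Int) + 1 - 1 := by ring
          exact h)
      exact this
    exact ih (by omega) _ h'

theorem pvCol_step (m num c iI : Int) (l : List Int) (dp : List (List Int))
    (hm : 1 ≤ m) (hnum : 0 ≤ num) (hc : 0 ≤ c) (hl : ∀ x ∈ l, 0 ≤ x)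
    (hci : c ≤ iI) (hin : iI ≤ num)
    (h : pvRel (m + 1).toNat (num + 1).toNat (pvColF l c (iI + 1)) dp) :
    pvRel (m + 1).toNat (num + 1).toNat (pvColF l c iI) (pvColBody c dp iI) := by
  unfold pvColBody
  have hlen : PySem.List.len dp - 2 = (m.toNat : Int) - 1 := by
    rw [PySem.List.len_eq, h.1]; omega
  rw [hlen]
  have hstart : pvRel (m + 1).toNat (num + 1).toNat (pvFinF l c iI ((m.toNat : Int) - 1)) dp := by
    refine pvRel_congr h ?_
    intro j' i' hj' hi'
    unfold pvColF pvFinF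
    exact if_congr (by omega) rfl rfl
  have hend := pvInner_loop m num c iI l hm hnum hc hl hci hin m.toNat (by omega) dp hstart
  refine pvRel_congr hend ?_
  intro j' i' hj' hi'
  unfold pvFinF pvColF
  by_cases h0 : (i' : Int) = iI ∧ j' = 0
  · rw [if_neg (by omega), if_pos (by omega)]
    rw [pvF_snoc l c _ _ hc hl, if_neg (by omega)]
    ring
  · exact if_congr (by omega) rfl rfl

theorem pvCol_loop (m num c : Int) (l : List Int)
    (hm : 1 ≤ m) (hnum : 0 ≤ num) (hc : 0 ≤ c) (hl : ∀ x ∈ l, 0 ≤ x) :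
    ∀ (k : Nat), c + (k : Int) ≤ num + 1 → ∀ dp,
      pvRel (m + 1).toNat (num + 1).toNat (pvColF l c (c + (k : Int))) dp →
      pvRel (m + 1).toNat (num + 1).toNat (pvColF l c c)
        ((PySem.List.pyRange (c + (k : Int) - 1) (c - 1) (-1)).foldl (pvColBody c) dp) := by
  intro k
  induction k with
  | zero =>
    intro _ dp h
    rw [PySem.List.pyRange_neg_one_eq_nil (by omega)]
    simpa using h
  | succ k ih =>
    intro hk dp h
    have e1 : c + ((k + 1 : Nat) : Int) - 1 = c + (k : Int) := by push_cast; ring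
    rw [e1]
    rw [PySem.List.pyRange_neg_one_cons (by omega), List.foldl_cons]
    have h' : pvRel (m + 1).toNat (num + 1).toNat (pvColF l c (c + (k : Int) + 1)) dp := by
      have e2 : c + ((k + 1 : Nat) : Int) = c + (k : Int) + 1 := by push_cast; ring
      rwa [e2] at h
    have step := pvCol_step m num c (c + (k : Int)) l dp hm hnum hc hl (by omega) (by omega) h'
    exact ih (by omega) _ step

theorem pvPass (m num c : Int) (l : List Int) (dp : List (List Int))
    (hm : 1 ≤ m) (hnum : 0 ≤ num) (hc : 0 ≤ c) (hl : ∀ x ∈ l, 0 ≤ x)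
    (h : pvRel (m + 1).toNat (num + 1).toNat (fun j i => pvF l j i) dp) :
    pvRel (m + 1).toNat (num + 1).toNat (fun j i => pvF (l ++ [c]) j i) (pvPassBody dp c) := by
  unfold pvPassBody
  have hrow0 : PySem.List.pyGetD dp 0 [] = dp.getD 0 [] := PySem.List.pyGetD_zero dp []
  have hdplen : dp.length = (m + 1).toNat := h.1
  have hrowlen : (dp.getD 0 []).length = (num + 1).toNat := by
    rw [List.getD_eq_getElem?_getD, List.getElem?_eq_getElem (by omega)]
    exact h.2.1 _ (List.getElem_mem (by omega))
  have hlen : PySem.List.len (PySem.List.pyGetD dp 0 []) - 1 = num := by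
    rw [hrow0, PySem.List.len_eq, hrowlen]; omega
  rw [hlen]
  by_cases hcn : c ≤ num
  · have hk : c + ((num + 1 - c).toNat : Int) = num + 1 := by omega
    have hstart : pvRel (m + 1).toNat (num + 1).toNat (pvColF l c (num + 1)) dp := by
      refine pvRel_congr h ?_
      intro j' i' hj' hi'
      unfold pvColF
      rw [if_neg (by omega)]
    have := pvCol_loop m num c l hm hnum hc hl (num + 1 - c).toNat (by omega) dp
      (by rwa [hk])
    rw [hk] at this
    simp only [show num + 1 - 1 = num from by ring] at this
    refine pvRel_congr this ?_
    intro j' i' hj' hi'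
    unfold pvColF
    by_cases hcc : c ≤ (i' : Int)
    · rw [if_pos hcc]
    · rw [if_neg hcc, pvF_snoc l c _ _ hc hl, if_neg (by omega)]
      ring
  · rw [PySem.List.pyRange_neg_one_eq_nil (by omega)]
    refine pvRel_congr h ?_
    intro j' i' hj' hi'
    rw [pvF_snoc l c _ _ hc hl, if_neg (by omega)]
    ring

theorem pvInit (m num : Int) (hm : 1 ≤ m) (hnum : 0 ≤ num) :
    pvRel (m + 1).toNat (num + 1).toNat (fun j i => pvF [] j i)
      (PySem.List.pySetD ((PySem.List.pyRange 0 (m + 1) 1).map (fun _ => List.replicate (num + 1).toNat 0)) 0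
        (PySem.List.pySetD
          (PySem.List.pyGetD ((PySem.List.pyRange 0 (m + 1) 1).map (fun _ => List.replicate (num + 1).toNat 0)) 0 []) 0 1)) := by
  have hdp0 : ((PySem.List.pyRange 0 (m + 1) 1).map (fun _ => List.replicate (num + 1).toNat (0 : Int)))
      = List.replicate (m + 1).toNat (List.replicate (num + 1).toNat (0 : Int)) := by
    rw [List.map_const']
    congr 1
    rw [PySem.List.length_pyRange_one]
    omega
  suffices key : ∀ dp : List (List Int),
      dp = List.replicate (m + 1).toNat (List.replicate (num + 1).toNat (0 : Int)) →
      pvRel (m + 1).toNat (num + 1).toNat (fun j i => pvF [] j i)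
        (PySem.List.pySetD dp 0 (PySem.List.pySetD (PySem.List.pyGetD dp 0 []) 0 1)) by
    exact key _ hdp0
  intro dp hdp
  subst hdp
  rw [PySem.List.pyGetD_zero, PySem.List.pySetD_of_nonneg _ _ (by norm_num),
      PySem.List.pySetD_of_nonneg _ _ (by norm_num)]
  simp only [Int.toNat_zero]
  have hMn : 0 < (m + 1).toNat := by omega
  have hNn : 0 < (num + 1).toNat := by omega
  have hrow0 : (List.replicate (m + 1).toNat (List.replicate (num + 1).toNat 0)).getD 0 []
      = List.replicate (num + 1).toNat (0 : Int) := by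
    rw [List.getD_eq_getElem?_getD, List.getElem?_eq_getElem (by simpa using hMn)]
    simp
  rw [hrow0]
  refine ⟨by simp, ?_, ?_⟩
  · intro row hrow
    rcases List.mem_or_eq_of_mem_set hrow with h1 | h1
    · rw [List.eq_of_mem_replicate h1]; simp
    · subst h1; simp
  · intro j i hj hi
    unfold pvGet2
    by_cases hj0 : j = 0
    · subst hj0
      have e1 : ((List.replicate (m + 1).toNat (List.replicate (num + 1).toNat (0:Int))).set 0
          ((List.replicate (num + 1).toNat (0:Int)).set 0 1)).getD 0 []
          = (List.replicate (num + 1).toNat (0:Int)).set 0 1 := by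
        rw [List.getD_eq_getElem?_getD, List.getElem?_set_self (by simpa using hMn)]; rfl
      rw [e1]
      by_cases hi0 : i = 0
      · subst hi0
        rw [List.getD_eq_getElem?_getD, List.getElem?_set_self (by simpa using hNn)]
        simp [pvF]
      · rw [List.getD_eq_getElem?_getD, List.getElem?_set_ne (by omega),
            List.getElem?_replicate_of_lt (by omega)]
        simp [pvF]
        omega
    · have e1 : ((List.replicate (m + 1).toNat (List.replicate (num + 1).toNat (0:Int))).set 0
          ((List.replicate (num + 1).toNat (0:Int)).set 0 1)).getD j []
          = List.replicate (num + 1).toNat (0:Int) := by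
        rw [List.getD_eq_getElem?_getD, List.getElem?_set_ne (by omega),
            List.getElem?_replicate_of_lt (by omega)]
        rfl
      rw [e1]
      rw [List.getD_eq_getElem?_getD, List.getElem?_replicate_of_lt (by omega)]
      simp [pvF]
      omega

theorem pvFold (m num : Int) (rest l : List Int) (dp : List (List Int))
    (hm : 1 ≤ m) (hnum : 0 ≤ num) (hl : ∀ x ∈ l, 0 ≤ x) (hrest : ∀ x ∈ rest, 0 ≤ x)
    (h : pvRel (m + 1).toNat (num + 1).toNat (fun j i => pvF l j i) dp) :
    pvRel (m + 1).toNat (num + 1).toNat (fun j i => pvF (l ++ rest) j i)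
      (rest.foldl pvPassBody dp) := by
  induction rest generalizing l dp with
  | nil => simpa using h
  | cons c rest ih =>
    have hc : 0 ≤ c := hrest c (by simp)
    have hrest' : ∀ x ∈ rest, 0 ≤ x := fun x hx => hrest x (by simp [hx])
    have hl' : ∀ x ∈ l ++ [c], 0 ≤ x := by
      intro x hx; rcases List.mem_append.1 hx with h1 | h1
      · exact hl x h1
      · simp at h1; omega
    have step := pvPass m num c l dp hm hnum hc hl h
    have := ih (l ++ [c]) (pvPassBody dp c) hl' hrest' step
    simpa using this

theorem pvGetWays_eq (m num : Int) (arr : List Int)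
    (hm : 1 ≤ m) (hnum : 0 ≤ num) (harr : ∀ x ∈ arr, 0 ≤ x) :
    pvGetWays m arr num =
      ((PySem.List.pyRange 0 (m + 1) 1).filter (fun j => decide (0 < pvF arr j num))).map
        (fun j => (j, pvF arr j num)) := by
  simp only [pvGetWays]
  have hrel := pvFold m num arr [] _ hm hnum (by simp) harr (pvInit m num hm hnum)
  simp only [List.nil_append] at hrel
  set dp2 := arr.foldl pvPassBody
    (PySem.List.pySetD ((PySem.List.pyRange 0 (m + 1) 1).map (fun _ => List.replicate (num + 1).toNat 0)) 0
      (PySem.List.pySetD (PySem.List.pyGetD ((PySem.List.pyRange 0 (m + 1) 1).map (fun _ => List.replicate (num + 1).toNat 0)) 0 []) 0 1)) with hdp2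
  have hlen : PySem.List.len dp2 = m + 1 := by
    rw [PySem.List.len_eq, hrel.1]; omega
  rw [hlen]
  have hbody : ∀ (acc : List (Int × Int)) (j : Int), j ∈ PySem.List.pyRange 0 (m + 1) 1 →
      (if PySem.List.pyGetD (PySem.List.pyGetD dp2 j []) num 0 > 0 then
        acc ++ [(j, PySem.List.pyGetD (PySem.List.pyGetD dp2 j []) num 0)] else acc)
      = (if decide (0 < pvF arr j num) = true then acc ++ [(j, pvF arr j num)] else acc) := by
    intro acc j hj
    rw [PySem.List.mem_pyRange_one] at hj
    have hj' : j = (j.toNat : Int) := (Int.toNat_of_nonneg hj.1).symm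
    have hn' : num = (num.toNat : Int) := (Int.toNat_of_nonneg hnum).symm
    have hread : PySem.List.pyGetD (PySem.List.pyGetD dp2 j []) num 0 = pvF arr j num := by
      rw [hj', hn', pvRel_read hrel j.toNat num.toNat (by omega) (by omega)]
    rw [hread]
    simp
  rw [PySem.List.foldl_congr_mem _ _ _ _ hbody,
      PySem.List.foldl_append_if (fun j => decide (0 < pvF arr j num)) (fun j => (j, pvF arr j num))]
  simp

theorem pvSumKey (K : List Int) (hK : K.Nodup) (j : Int) (g : Int → Int) :
    ((K.map (fun j' => if j = j' then g j' else 0)).sum) = if j ∈ K then g j else 0 := by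
  induction K with
  | nil => simp
  | cons k K ih =>
    rcases List.nodup_cons.1 hK with ⟨hk, hK'⟩
    by_cases hjk : j = k
    · subst hjk
      have hz : ((K.map (fun j' => if j = j' then g j' else 0)).sum) = 0 := by
        rw [ih hK']; simp [hk]
      simp [hz]
    · simp only [List.map_cons, List.sum_cons, if_neg hjk, ih hK', List.mem_cons]
      simp [hjk]

theorem pvSumFilter (p : Int → Bool) (f : Int → Int) (L : List Int) :
    (((L.filter p).map f).sum) = ((L.map (fun x => if p x then f x else 0)).sum) := by
  induction L with
  | nil => simp
  | cons x L ih =>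
    by_cases hx : p x <;> simp [hx, ih]

theorem pvRes_eq (m suma sumb : Int) (arr : List Int)
    (hm : 1 ≤ m) (ha : 0 ≤ suma) (hb : 0 ≤ sumb) (harr : ∀ x ∈ arr, 0 ≤ x) :
    (pvGetWays m arr suma).foldl (fun res p =>
        (pvGetWays m arr sumb).foldl
          (fun res q => if p.1 = q.1 then res + p.2 * q.2 else res) res) 0 =
      (PySem.List.pyRange 0 (m + 1) 1).foldl
        (fun res j => res + pvF arr j suma * pvF arr j sumb) 0 := by
  rw [pvGetWays_eq m suma arr hm ha harr, pvGetWays_eq m sumb arr hm hb harr]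
  set L := PySem.List.pyRange 0 (m + 1) 1 with hL
  set Ka := L.filter (fun j => decide (0 < pvF arr j suma)) with hKa
  set Kb := L.filter (fun j => decide (0 < pvF arr j sumb)) with hKb
  have hKbn : Kb.Nodup := (PySem.List.nodup_pyRange_one 0 (m + 1)).filter _
  -- inner loop is an accumulating sum
  have hinner : ∀ (p : Int × Int) (res : Int),
      (Kb.map (fun j => (j, pvF arr j sumb))).foldl
        (fun res q => if p.1 = q.1 then res + p.2 * q.2 else res) res
      = res + ((Kb.map (fun j' => if p.1 = j' then p.2 * pvF arr j' sumb else 0)).sum) := by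
    intro p res
    rw [PySem.List.foldl_congr_mem _ _
      (fun res q => res + (if p.1 = q.1 then p.2 * q.2 else 0)) _
      (by intro acc q _; by_cases h : p.1 = q.1 <;> simp [h]),
      PySem.List.foldl_add, List.map_map]
    congr 1
  -- outer loop likewise
  have houter : (Ka.map (fun j => (j, pvF arr j suma))).foldl (fun res p =>
      (Kb.map (fun j => (j, pvF arr j sumb))).foldl
        (fun res q => if p.1 = q.1 then res + p.2 * q.2 else res) res) 0
      = ((Ka.map (fun j => ((Kb.map (fun j' => if j = j' then
          pvF arr j suma * pvF arr j' sumb else 0)).sum))).sum) := by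
    rw [PySem.List.foldl_congr_mem _ _
      (fun res p => res + ((Kb.map (fun j' => if p.1 = j' then p.2 * pvF arr j' sumb else 0)).sum)) _
      (by intro acc p _; exact hinner p acc),
      PySem.List.foldl_add, List.map_map]
    rw [zero_add]
    simp only [Function.comp_def]
  rw [houter]
  -- collapse the keyed sum
  have hcollapse : ∀ j : Int,
      ((Kb.map (fun j' => if j = j' then pvF arr j suma * pvF arr j' sumb else 0)).sum)
      = if j ∈ Kb then pvF arr j suma * pvF arr j sumb else 0 := by
    intro j
    exact pvSumKey Kb hKbn j (fun j' => pvF arr j suma * pvF arr j' sumb)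
  rw [List.map_congr_left (fun j _ => hcollapse j)]
  -- RHS as a sum
  rw [PySem.List.foldl_add]
  simp only [zero_add]
  rw [hKa, pvSumFilter]
  refine congrArg List.sum (List.map_congr_left ?_)
  intro j hj
  have hwa := pvF_nonneg arr j suma
  have hwb := pvF_nonneg arr j sumb
  by_cases h1 : 0 < pvF arr j suma
  · by_cases h2 : 0 < pvF arr j sumb
    · have hmem : j ∈ Kb := by
        rw [hKb, List.mem_filter]; exact ⟨hj, by simpa using h2⟩
      simp [h1, hmem]
    · have hz : pvF arr j sumb = 0 := by omega
      have hnmem : j ∉ Kb := by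
        rw [hKb, List.mem_filter]
        intro hmem
        exact h2 (by simpa using hmem.2)
      simp [h1, hnmem, hz]
  · have hz : pvF arr j suma = 0 := by omega
    simp [hz]

theorem pvF_eq_zero (l : List Int) (j i : Int) (h : (l.length : Int) < j) : pvF l j i = 0 := by
  induction l generalizing j i with
  | nil => simp only [pvF]; rw [if_neg (by simp at h; omega)]
  | cons c rest ih =>
    simp only [pvF]
    rw [ih j i (by simp at h ⊢; omega)]
    split_ifs with hg
    · rw [ih (j - 1) (i - c) (by simp at h ⊢; omega)]; ring
    · ring

theorem pvRangeCap (m sa sb : Int) (arr : List Int) (hm : 1 ≤ m) :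
    (PySem.List.pyRange 0 (m + 1) 1).foldl
      (fun res j => res + pvF arr j sa * pvF arr j sb) 0 =
    (PySem.List.pyRange 0 (min m (PySem.List.len arr) + 1) 1).foldl
      (fun res j => res + pvF arr j sa * pvF arr j sb) 0 := by
  have hlen : PySem.List.len arr = (arr.length : Int) := PySem.List.len_eq arr
  have h0 : 0 ≤ min m (PySem.List.len arr) := by rw [hlen]; omega
  rw [PySem.List.pyRange_one_append 0 (min m (PySem.List.len arr) + 1) (m + 1)
      (by omega) (by rw [hlen]; omega)]
  rw [List.foldl_append]
  have hid : ∀ (l : List Int) (r0 : Int), l.foldl (fun res _ => res) r0 = r0 := by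
    intro l r0; induction l generalizing r0 with
    | nil => rfl
    | cons x l ih => simp [ih r0]
  rw [PySem.List.foldl_congr_mem _ _ (fun res _ => res) _ ?hz, hid]
  case hz =>
    intro acc j hj
    rw [PySem.List.mem_pyRange_one] at hj
    rw [pvF_eq_zero arr j sa (by rw [hlen] at hj; omega)]
    ring

theorem pvMain (m r s : Int) (arr : List Int)
    (hP : Pre_count_subsequence_pairs m r s arr) :
    count_subsequence_pairs m r s arr = count_subsequence_pairs_alt m r s arr := by
  simp only [count_subsequence_pairs, count_subsequence_pairs_alt]
  by_cases h1 : m = 0 ∨ r ≤ s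
  · rw [if_pos h1, if_pos (by tauto)]
  · rw [if_neg h1]
    by_cases h2 : PySem.Int.mod (r - s) 2 ≠ 0
    · rw [if_pos h2, if_pos (by tauto)]
    · rw [if_neg h2, if_neg (by tauto)]
      have hmod : (r - s) % 2 = 0 := by
        have := PySem.Int.mod_eq_emod_of_pos (a := r - s) (b := 2) (by norm_num)
        omega
      have hdiv : PySem.Int.floordiv (r - s) 2 = (r - s) / 2 :=
        PySem.Int.floordiv_eq_ediv_of_pos (by norm_num)
      obtain ⟨hm, hrs, harr⟩ : 1 ≤ m ∧ 0 ≤ r + s ∧ ∀ c ∈ arr, 0 ≤ c := by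
        rcases hP with hP | hP
        · exfalso; tauto
        · exact hP
      have hb : 0 ≤ PySem.Int.floordiv (r - s) 2 := by rw [hdiv]; omega
      have ha : 0 ≤ r - PySem.Int.floordiv (r - s) 2 := by rw [hdiv]; omega
      rw [pvRes_eq m _ _ arr hm ha hb harr, pvRangeCap m _ _ arr hm]

-- ===== VERDICT (by name: the statement is the Claim_ definition above) =====
theorem count_subsequence_pairs_spec : Claim_equal_count_subsequence_pairs := by
  intro m r s arr _ hP
  unfold Spec_count_subsequence_pairs
  exact pvMain m r s arr hP

theorem count_subsequence_pairs_raises : Claim_raises_count_subsequence_pairs := by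
  unfold Claim_raises_count_subsequence_pairs
  constructor
  · intro m r s arr _ hR hP
    obtain ⟨h1, h2⟩ := hR
    rcases hP with hP | ⟨hm, hrs, hall⟩
    · exact h1 hP
    · rcases h2 with h | h | ⟨c, hc, hcn⟩
      · omega
      · omega
      · exact absurd (hall c hc) (by omega)
  · exact ⟨by decide, by decide, by decide⟩

-- self-check: the stated raise-witness really lies in the Raises_ region
theorem pvRaisesWitness_ok : Raises_count_subsequence_pairs 2 6 2 [1, -1] :=
  count_subsequence_pairs_raises.2.2.1
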